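-- pv_equiv track=rewrite | github.com/th3tard1sparadox/aoc | aoc21/day4.py | check_cols
-- ===== SOURCE A (Python) =====
-- board = []
--
-- def check_cols(board, nums):
--     for i in range(len(board[0])):
--         col = []
--         for row in board:
--             col.append(row[i])
--         if all (item in nums for item in col):
--             return True
--     return False
-- ===== SOURCE B (Python) =====
-- def check_cols(board, nums):
--     ncols = len(board[0])
--     ok = [True] * ncols
--     for row in board:
--         ok = [ok[i] and row[i] in nums for i in range(ncols)]
--     return any(ok)
-- ===== Notes on version B (the rewrite author's own statement) =====
-- stated objective: alternative
-- what changed: Single row-major pass maintaining a per-column survivor boolean list, instead of A's column-major nesting that materializes each column list and calls all() on it.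
-- outside the precondition, e.g. on check_cols([[1, 2], [3]], [1, 2, 3]): A returns True, B raises IndexError
import Mathlib
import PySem

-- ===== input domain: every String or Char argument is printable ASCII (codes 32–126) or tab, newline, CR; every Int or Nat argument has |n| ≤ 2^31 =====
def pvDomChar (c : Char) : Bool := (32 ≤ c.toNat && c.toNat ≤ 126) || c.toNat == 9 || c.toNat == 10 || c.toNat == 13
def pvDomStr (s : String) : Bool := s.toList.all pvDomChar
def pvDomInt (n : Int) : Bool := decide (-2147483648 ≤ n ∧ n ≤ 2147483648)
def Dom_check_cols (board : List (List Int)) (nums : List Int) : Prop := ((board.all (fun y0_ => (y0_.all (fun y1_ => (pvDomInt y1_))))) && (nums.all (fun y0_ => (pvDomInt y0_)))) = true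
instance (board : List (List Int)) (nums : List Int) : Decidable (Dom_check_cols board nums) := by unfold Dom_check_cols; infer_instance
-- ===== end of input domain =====

-- B traverses row-major with a survivor boolean per column instead of A's column-major
-- column materialization; equality of the RETURN value is proved on Pre_ below.

-- ===== PORT A =====
-- loop over i in range(len(board[0])): build column i, return True if all its items are in nums.
-- row[i] is ported as row.getD i 0: inside Pre_check_cols every index is in range, where this is exact.
def checkColsGo (board : List (List Int)) (nums : List Int) : List Nat → Bool
  | [] => false
  | i :: rest =>
      let col := board.foldl (fun col row => col ++ [row.getD i 0]) []
      if col.all (fun item => nums.contains item) then true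
      else checkColsGo board nums rest

def check_cols (board : List (List Int)) (nums : List Int) : Bool :=
  checkColsGo board nums (List.range ((board.headD []).length))

-- ===== PORT B =====
-- ok = [True]*ncols; for each row, ok = [ok[i] and row[i] in nums for i in range(ncols)]; any(ok).
-- row[i] / ok[i] ported as getD: inside Pre_check_cols every index is in range, where this is exact.
def check_cols_alt (board : List (List Int)) (nums : List Int) : Bool :=
  let ncols := (board.headD []).length
  let ok := board.foldl
    (fun ok row => (List.range ncols).map (fun i => ok.getD i true && nums.contains (row.getD i 0)))
    (List.replicate ncols true)
  ok.any id

-- ===== PRECONDITION & SPEC =====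
-- Pre_ excludes the empty board (A raises IndexError on board[0]) and ragged boards (some row
-- shorter than the first row), on which whether each program returns or raises IndexError is an
-- artefact of its own traversal order (A column-major, B row-major).
def Pre_check_cols (board : List (List Int)) (nums : List Int) : Prop :=
  board ≠ [] ∧ ∀ row ∈ board, (board.headD []).length ≤ row.length
instance (board : List (List Int)) (nums : List Int) : Decidable (Pre_check_cols board nums) := by
  unfold Pre_check_cols; infer_instance

def pvWitness_check_cols : List (List Int) × List Int := ([[1, 2], [3, 4]], [1, 3])

def Spec_check_cols (board : List (List Int)) (nums : List Int) (out : Bool) : Prop := out = check_cols_alt board nums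
instance (board : List (List Int)) (nums : List Int) (out : Bool) : Decidable (Spec_check_cols board nums out) := by unfold Spec_check_cols; infer_instance

-- ===== CLAIM (what is proved, stated in full; the proofs are below) =====
def Claim_equal_check_cols : Prop := ∀ (board : List (List Int)) (nums : List Int), Dom_check_cols board nums → Pre_check_cols board nums → Spec_check_cols board nums (check_cols board nums)

-- ===== LEMMAS AND PROOFS =====

-- the common characterisation: "some column index i < ncols has all its entries in nums"
theorem pv_col_fold (board : List (List Int)) (i : Nat) (acc : List Int) :
    board.foldl (fun col row => col ++ [row.getD i 0]) acc
      = acc ++ board.map (fun row => row.getD i 0) := by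
  induction board generalizing acc with
  | nil => simp
  | cons r rs ih => rw [List.foldl_cons, ih]; simp

theorem pv_A_any (board : List (List Int)) (nums : List Int) (is : List Nat) :
    checkColsGo board nums is
      = is.any (fun i => board.all (fun row => nums.contains (row.getD i 0))) := by
  induction is with
  | nil => rfl
  | cons i rest ih =>
      simp only [checkColsGo, pv_col_fold, List.nil_append, List.all_map, List.any_cons, ih]
      split <;> simp_all

theorem pv_B_fold (nums : List Int) (ncols : Nat) (g : Nat → Bool) (rows : List (List Int)) :
    rows.foldl
        (fun ok row => (List.range ncols).map (fun i => ok.getD i true && nums.contains (row.getD i 0)))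
        ((List.range ncols).map g)
      = (List.range ncols).map
          (fun i => g i && rows.all (fun row => nums.contains (row.getD i 0))) := by
  induction rows generalizing g with
  | nil => simp
  | cons r rs ih =>
      rw [List.foldl_cons]
      have hstep : (List.range ncols).map
            (fun i => ((List.range ncols).map g).getD i true && nums.contains (r.getD i 0))
          = (List.range ncols).map (fun i => g i && nums.contains (r.getD i 0)) := by
        apply List.map_congr_left
        intro i hi
        have : i < ncols := List.mem_range.mp hi
        simp [List.getD, this]
      rw [hstep, ih]
      apply List.map_congr_left
      intro i _
      simp [Bool.and_assoc]

theorem check_cols_eq (board : List (List Int)) (nums : List Int) :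
    check_cols board nums = check_cols_alt board nums := by
  show checkColsGo board nums (List.range ((board.headD []).length))
      = (board.foldl
          (fun ok row => (List.range ((board.headD []).length)).map
            (fun i => ok.getD i true && nums.contains (row.getD i 0)))
          (List.replicate ((board.headD []).length) true)).any id
  set ncols := (board.headD []).length with hn
  have hrep : (List.replicate ncols true) = (List.range ncols).map (fun _ => true) := by
    simp [List.map_const']
  rw [pv_A_any, hrep, pv_B_fold]
  simp [List.any_map]

-- ===== VERDICT (by name: the statement is the Claim_ definition above) =====
theorem check_cols_spec : Claim_equal_check_cols := by
  intro board nums _ _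
  unfold Spec_check_cols
  exact check_cols_eq board nums
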